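-- pv_equiv track=rewrite | github.com/AgEnT4770/Intelligent-connect-6-player | heuristics.py | longest_chain_open
-- ===== SOURCE A (Python) =====
-- def count_stones(board, r, c, dr, dc, player):
--     count = 0
--     N = len(board)
--     while 0 <= r < N and 0 <= c < N and board[r][c] == player:
--         count += 1
--         r += dr
--         c += dc
--     return count
--
-- def longest_chain_open(board, player):
--     DIRS = [(0,1), (1,0), (1,1), (1,-1)] #directions: right, down, downRight diagonal, downLeft
--     N = len(board)
--     best_length = 0
--     best_open = 0
--
--     for r in range(N):
--         for c in range(N):
--             if board[r][c] != player:
--                 continue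
--
--             for dr, dc in DIRS:
--                 left  = count_stones(board, r-dr, c-dc, -dr, -dc, player)
--                 right = count_stones(board, r+dr, c+dc,  dr,  dc, player)
--                 length = left + 1 + right
--
--                 #open ends
--                 end1_r = r - (left + 1)*dr
--                 end1_c = c - (left + 1)*dc
--                 end2_r = r + (right + 1)*dr
--                 end2_c = c + (right + 1)*dc
--
--                 def is_open(rr, cc):
--                     return 0 <= rr < N and 0 <= cc < N and board[rr][cc] == 0
--
--                 open_ends = is_open(end1_r, end1_c) + is_open(end2_r, end2_c)
--
--                 # use chain only if there's at least one open end
--                 if open_ends > 0 and length > best_length: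
--                     best_length = length
--                     best_open = open_ends
--
--     return best_length, best_open
-- ===== SOURCE B (Python) =====
-- def _suffix_counts(board, player, dr, dc, N):
--     # cnt[(r, c)] = number of consecutive player stones from (r, c) along (dr, dc);
--     # filled in reverse row-major order so the successor cell is already computed.
--     cnt = {}
--     for r in range(N - 1, -1, -1):
--         for c in range(N - 1, -1, -1):
--             if board[r][c] == player:
--                 cnt[(r, c)] = 1 + cnt.get((r + dr, c + dc), 0)
--     return cnt
--
-- def longest_chain_open(board, player):
--     # Dynamic programming: one suffix-run-length table per direction replaces A's
--     # per-stone two-way walks; each maximal run is then scored once, at its head,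
--     # in the same row-major order, so the record (and its tie-break) matches A.
--     DIRS = [(0, 1), (1, 0), (1, 1), (1, -1)]
--     N = len(board)
--     tables = [((dr, dc), _suffix_counts(board, player, dr, dc, N)) for dr, dc in DIRS]
--     best_length = 0
--     best_open = 0
--     for r in range(N):
--         for c in range(N):
--             for (dr, dc), cnt in tables:
--                 length = cnt.get((r, c), 0)
--                 if length == 0:
--                     continue
--                 pr, pc = r - dr, c - dc
--                 if 0 <= pr < N and 0 <= pc < N and board[pr][pc] == player:
--                     continue  # interior cell of a run: scored at its head
--                 er, ec = r + length * dr, c + length * dc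
--                 open_ends = (0 <= pr < N and 0 <= pc < N and board[pr][pc] == 0) \
--                           + (0 <= er < N and 0 <= ec < N and board[er][ec] == 0)
--                 if open_ends > 0 and length > best_length:
--                     best_length = length
--                     best_open = open_ends
--     return best_length, best_open
-- ===== Notes on version B (the rewrite author's own statement) =====
-- stated objective: alternative
-- what changed: A re-walks every run in both directions from each of its member cells; B instead precomputes, per direction, a suffix run-length table by one reverse row-major dynamic-programming sweep and then scores each maximal run once, at its head, by table lookups, keeping A's row-major record order so tie-breaks are identical.
import Mathlib
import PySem

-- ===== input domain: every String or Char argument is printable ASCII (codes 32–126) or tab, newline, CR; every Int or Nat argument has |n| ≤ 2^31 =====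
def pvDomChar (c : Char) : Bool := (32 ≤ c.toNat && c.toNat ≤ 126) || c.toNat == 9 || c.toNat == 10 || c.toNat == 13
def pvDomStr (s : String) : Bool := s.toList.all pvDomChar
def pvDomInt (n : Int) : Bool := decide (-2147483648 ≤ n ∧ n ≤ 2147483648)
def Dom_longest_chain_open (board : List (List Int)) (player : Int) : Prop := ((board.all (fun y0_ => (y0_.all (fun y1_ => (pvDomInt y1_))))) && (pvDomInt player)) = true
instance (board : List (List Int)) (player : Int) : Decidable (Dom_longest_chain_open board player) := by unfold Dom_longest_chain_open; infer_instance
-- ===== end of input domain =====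

-- B replaces A's per-stone two-way walks by one reverse row-major dynamic-programming sweep
-- per direction (a dict of suffix run lengths) plus a row-major scoring pass that scores each
-- maximal run once, at its head, by table lookup (objective: alternative algorithm).

-- ===== PORT A =====
-- board[r][c]; every access in both programs is guarded by 0 <= r < N and 0 <= c < N first
def pvCell (board : List (List Int)) (r c : Int) : Int :=
  (PySem.List.pyGet? ((PySem.List.pyGet? board r).getD []) c).getD 0

-- '0 <= r < N and 0 <= c < N and board[r][c] == v' (the loop guard of count_stones / is_open)
def pvGuard (board : List (List Int)) (v r c : Int) : Bool :=
  decide (0 ≤ r) && decide (r < (board.length : Int)) && decide (0 ≤ c) &&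
    decide (c < (board.length : Int)) && (pvCell board r c == v)

-- count_stones: while-loop as fuel recursion (the loop runs ≤ N times; callers pass fuel N+1)
def pvCountA (board : List (List Int)) (player dr dc : Int) : Nat → Int → Int → Int
  | 0, _, _ => 0
  | f + 1, r, c =>
    if pvGuard board player r c then 1 + pvCountA board player dr dc f (r + dr) (c + dc) else 0

def pvDirs : List (Int × Int) := [(0, 1), (1, 0), (1, 1), (1, -1)]

-- body of A's innermost loop: one direction at one stone
def pvStepA (board : List (List Int)) (player r c : Int) (s : Int × Int) (d : Int × Int) :
    Int × Int :=
  let F := board.length + 1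
  let left := pvCountA board player (-d.1) (-d.2) F (r - d.1) (c - d.2)
  let right := pvCountA board player d.1 d.2 F (r + d.1) (c + d.2)
  let length := left + 1 + right
  let openEnds : Int :=
    (if pvGuard board 0 (r - (left + 1) * d.1) (c - (left + 1) * d.2) then 1 else 0) +
      (if pvGuard board 0 (r + (right + 1) * d.1) (c + (right + 1) * d.2) then 1 else 0)
  if openEnds > 0 ∧ length > s.1 then (length, openEnds) else s

def pvCellStepA (board : List (List Int)) (player : Int) (s : Int × Int) (rc : Int × Int) :
    Int × Int :=
  if pvCell board rc.1 rc.2 ≠ player then s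
  else pvDirs.foldl (pvStepA board player rc.1 rc.2) s

def longest_chain_open (board : List (List Int)) (player : Int) : Int × Int :=
  let N : Int := board.length
  (PySem.List.pyRange 0 N 1).foldl
    (fun s r =>
      (PySem.List.pyRange 0 N 1).foldl (fun s c => pvCellStepA board player s (r, c)) s)
    (0, 0)

-- ===== PORT B =====
-- _suffix_counts: the dict cnt, filled over the two reversed ranges
def pvTab (board : List (List Int)) (player dr dc N : Int) : PySem.Dict (Int × Int) Int :=
  (PySem.List.pyRange (N - 1) (-1) (-1)).foldl
    (fun cnt r =>
      (PySem.List.pyRange (N - 1) (-1) (-1)).foldl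
        (fun cnt c =>
          if pvCell board r c == player then
            cnt.insert (r, c) (1 + cnt.getD (r + dr, c + dc) 0)
          else cnt)
        cnt)
    PySem.Dict.empty

-- body of B's innermost scoring loop: one (direction, table) pair at one cell
def pvScore (board : List (List Int)) (player r c : Int) (s : Int × Int)
    (dt : (Int × Int) × PySem.Dict (Int × Int) Int) : Int × Int :=
  let N : Int := board.length
  let length := dt.2.getD (r, c) 0
  if length == 0 then s
  else
    let pr := r - dt.1.1
    let pc := c - dt.1.2
    if decide (0 ≤ pr) && decide (pr < N) && decide (0 ≤ pc) && decide (pc < N) &&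
        (pvCell board pr pc == player) then s
    else
      let er := r + length * dt.1.1
      let ec := c + length * dt.1.2
      let openEnds : Int :=
        (if decide (0 ≤ pr) && decide (pr < N) && decide (0 ≤ pc) && decide (pc < N) &&
            (pvCell board pr pc == 0) then 1 else 0) +
          (if decide (0 ≤ er) && decide (er < N) && decide (0 ≤ ec) && decide (ec < N) &&
              (pvCell board er ec == 0) then 1 else 0)
      if openEnds > 0 ∧ length > s.1 then (length, openEnds) else s

def longest_chain_open_alt (board : List (List Int)) (player : Int) : Int × Int :=
  let N : Int := board.length
  let tables :=
    ([(0, 1), (1, 0), (1, 1), (1, -1)] : List (Int × Int)).map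
      (fun d => (d, pvTab board player d.1 d.2 N))
  (PySem.List.pyRange 0 N 1).foldl
    (fun s r =>
      (PySem.List.pyRange 0 N 1).foldl
        (fun s c => tables.foldl (pvScore board player r c) s) s)
    (0, 0)

-- ===== PRECONDITION & SPEC =====
-- Pre_ excludes exactly the boards with a row shorter than len(board): there the Python A
-- (and B) raises IndexError reading board[r][c]; rows may be longer, only N columns are read.
def Pre_longest_chain_open (board : List (List Int)) (player : Int) : Prop :=
  ∀ row ∈ board, board.length ≤ row.length

instance (board : List (List Int)) (player : Int) :
    Decidable (Pre_longest_chain_open board player) := by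
  unfold Pre_longest_chain_open; infer_instance

def pvWitness_longest_chain_open : List (List Int) × Int := ([[1, 0], [0, 1]], 1)

def Spec_longest_chain_open (board : List (List Int)) (player : Int) (out : Int × Int) : Prop := out = longest_chain_open_alt board player
instance (board : List (List Int)) (player : Int) (out : Int × Int) : Decidable (Spec_longest_chain_open board player out) := by unfold Spec_longest_chain_open; infer_instance

-- ===== CLAIM (what is proved, stated in full; the proofs are below) =====
def Claim_equal_longest_chain_open : Prop := ∀ (board : List (List Int)) (player : Int), Dom_longest_chain_open board player → Pre_longest_chain_open board player → Spec_longest_chain_open board player (longest_chain_open board player)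

-- ===== LEMMAS AND PROOFS =====

-- the flattened row-major cell list both scoring double loops traverse
def pvCells (N : Int) : List (Int × Int) :=
  (PySem.List.pyRange 0 N 1).flatMap fun r =>
    (PySem.List.pyRange 0 N 1).map fun c => (r, c)

-- row-major order on cells
def pvRM (a b : Int × Int) : Prop := a.1 < b.1 ∨ (a.1 = b.1 ∧ a.2 < b.2)

def pvUnit (d : Int × Int) : Prop :=
  (d.1 = 0 ∨ d.1 = 1 ∨ d.1 = -1) ∧ (d.2 = 0 ∨ d.2 = 1 ∨ d.2 = -1) ∧ ¬(d.1 = 0 ∧ d.2 = 0)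

-- termination measure of the count_stones walk
def pvMeas (N dr dc r c : Int) : Nat :=
  (if dr = 1 then N - r else if dr = -1 then r + 1 else if dc = 1 then N - c else c + 1).toNat

-- A's candidate at one stone and direction
def pvLeft (board : List (List Int)) (player r c : Int) (d : Int × Int) : Int :=
  pvCountA board player (-d.1) (-d.2) (board.length + 1) (r - d.1) (c - d.2)

def pvRight (board : List (List Int)) (player r c : Int) (d : Int × Int) : Int :=
  pvCountA board player d.1 d.2 (board.length + 1) (r + d.1) (c + d.2)

def pvLen (board : List (List Int)) (player r c : Int) (d : Int × Int) : Int :=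
  pvLeft board player r c d + 1 + pvRight board player r c d

def pvOpen (board : List (List Int)) (player r c : Int) (d : Int × Int) : Int :=
  (if pvGuard board 0 (r - (pvLeft board player r c d + 1) * d.1)
      (c - (pvLeft board player r c d + 1) * d.2) then 1 else 0) +
    (if pvGuard board 0 (r + (pvRight board player r c d + 1) * d.1)
        (c + (pvRight board player r c d + 1) * d.2) then 1 else 0)

-- 'best so far already beats every open candidate at (r,c)'
def pvGoodAt (board : List (List Int)) (player : Int) (s : Int × Int) (r c : Int) : Prop :=
  ∀ d ∈ pvDirs, 0 < pvOpen board player r c d → pvLen board player r c d ≤ s.1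

-- proof-side restatement of B's scoring step with the table lookup replaced by the count
def pvStepB (board : List (List Int)) (player r c : Int) (s : Int × Int) (d : Int × Int) :
    Int × Int :=
  if pvGuard board player (r - d.1) (c - d.2) then s
  else
    let len := pvCountA board player d.1 d.2 (board.length + 1) r c
    let openEnds : Int :=
      (if pvGuard board 0 (r - d.1) (c - d.2) then 1 else 0) +
        (if pvGuard board 0 (r + len * d.1) (c + len * d.2) then 1 else 0)
    if openEnds > 0 ∧ len > s.1 then (len, openEnds) else s

def pvCellStepB (board : List (List Int)) (player : Int) (s : Int × Int) (rc : Int × Int) :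
    Int × Int :=
  if pvCell board rc.1 rc.2 ≠ player then s
  else pvDirs.foldl (pvStepB board player rc.1 rc.2) s

theorem pvGuard_iff (board : List (List Int)) (v r c : Int) :
    pvGuard board v r c = true ↔
      0 ≤ r ∧ r < (board.length : Int) ∧ 0 ≤ c ∧ c < (board.length : Int) ∧
        pvCell board r c = v := by
  simp [pvGuard, and_assoc]

theorem pvCount_zero (board : List (List Int)) (player dr dc : Int) (r c : Int)
    (h : ¬ pvGuard board player r c) (f : Nat) :
    pvCountA board player dr dc f r c = 0 := by
  cases f <;> simp [pvCountA, h]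

theorem pvCount_succ (board : List (List Int)) (player dr dc : Int) (r c : Int)
    (h : pvGuard board player r c) (f : Nat) :
    pvCountA board player dr dc (f + 1) r c = 1 + pvCountA board player dr dc f (r + dr) (c + dc) := by
  simp [pvCountA, h]

theorem pvMeas_dec (board : List (List Int)) (v dr dc r c : Int) (hd : pvUnit (dr, dc))
    (h : pvGuard board v r c) :
    pvMeas (board.length : Int) dr dc (r + dr) (c + dc) < pvMeas (board.length : Int) dr dc r c := by
  rw [pvGuard_iff] at h
  obtain ⟨h1, h2, h3, h4, -⟩ := h
  obtain ⟨hdr, hdc, hnz⟩ := hd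
  simp only [pvMeas]
  rcases hdr with h | h | h <;> rcases hdc with h' | h' | h' <;> simp_all

theorem pvCount_stable (board : List (List Int)) (player dr dc : Int) (hd : pvUnit (dr, dc)) :
    ∀ (f : Nat) (r c : Int) (g : Nat),
      pvMeas (board.length : Int) dr dc r c ≤ f →
      pvMeas (board.length : Int) dr dc r c ≤ g →
      pvCountA board player dr dc f r c = pvCountA board player dr dc g r c := by
  intro f
  induction f with
  | zero =>
    intro r c g hf hg
    by_cases h : pvGuard board player r c
    · exact absurd (pvMeas_dec board player dr dc r c hd h) (by omega)
    · rw [pvCount_zero board player dr dc r c h, pvCount_zero board player dr dc r c h]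
  | succ f ih =>
    intro r c g hf hg
    by_cases h : pvGuard board player r c
    · have hdec := pvMeas_dec board player dr dc r c hd h
      obtain ⟨g', rfl⟩ : ∃ g', g = g' + 1 := ⟨g - 1, by omega⟩
      rw [pvCount_succ board player dr dc r c h, pvCount_succ board player dr dc r c h,
        ih (r + dr) (c + dc) g' (by omega) (by omega)]
    · rw [pvCount_zero board player dr dc r c h, pvCount_zero board player dr dc r c h]

-- A's inner step written through the candidate functions
theorem pvStepA_eq (board : List (List Int)) (player r c : Int) (s : Int × Int) (d : Int × Int) :
    pvStepA board player r c s d =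
      if 0 < pvOpen board player r c d ∧ s.1 < pvLen board player r c d
      then (pvLen board player r c d, pvOpen board player r c d) else s := rfl

theorem pvStepA_mono (board : List (List Int)) (player r c : Int) (s : Int × Int)
    (d : Int × Int) : s.1 ≤ (pvStepA board player r c s d).1 := by
  rw [pvStepA_eq]; split_ifs with h
  · exact le_of_lt h.2
  · exact le_refl _

theorem pvGoodAt_mono (board : List (List Int)) (player : Int) (s t : Int × Int) (r c : Int)
    (h : s.1 ≤ t.1) (hg : pvGoodAt board player s r c) : pvGoodAt board player t r c := by
  intro d hd ho
  exact le_trans (hg d hd ho) h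

theorem pvUnit_neg (d : Int × Int) (h : pvUnit d) : pvUnit (-d.1, -d.2) := by
  obtain ⟨h1, h2, h3⟩ := h
  exact ⟨by omega, by omega, by omega⟩

theorem pvMeas_le_of_in (N d1 d2 r c : Int) (hu : pvUnit (d1, d2))
    (h : 0 ≤ r ∧ r < N ∧ 0 ≤ c ∧ c < N) :
    pvMeas N d1 d2 (r + d1) (c + d2) ≤ N.toNat := by
  obtain ⟨hd1, hd2, hnz⟩ := hu
  simp only [pvMeas]
  rcases hd1 with h1 | h1 | h1 <;> rcases hd2 with h2 | h2 | h2 <;> simp_all <;> omega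

-- the shift lemma: the candidate is the same at every stone of one run
theorem pvCand_shift (board : List (List Int)) (player r c : Int) (d : Int × Int)
    (hd : pvUnit d) (hc : pvGuard board player r c)
    (hp : pvGuard board player (r - d.1) (c - d.2)) :
    pvLen board player r c d = pvLen board player (r - d.1) (c - d.2) d ∧
      pvOpen board player r c d = pvOpen board player (r - d.1) (c - d.2) d := by
  have hu' : pvUnit (d.1, d.2) := by rwa [Prod.mk.eta]
  have hun : pvUnit (-d.1, -d.2) := pvUnit_neg d hu'
  have hrin := (pvGuard_iff board player r c).mp hc
  have hpin := (pvGuard_iff board player (r - d.1) (c - d.2)).mp hp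
  -- left(r,c) = 1 + left(prev)
  have hL : pvLeft board player r c d = 1 + pvLeft board player (r - d.1) (c - d.2) d := by
    unfold pvLeft
    rw [pvCount_succ board player (-d.1) (-d.2) _ _ hp board.length]
    congr 1
    have := pvMeas_le_of_in (board.length : Int) (-d.1) (-d.2) (r - d.1) (c - d.2) hun
      ⟨hpin.1, hpin.2.1, hpin.2.2.1, hpin.2.2.2.1⟩
    have he1 : r - d.1 + -d.1 = r - d.1 - d.1 := by ring
    have he2 : c - d.2 + -d.2 = c - d.2 - d.2 := by ring
    rw [he1, he2] at this
    exact pvCount_stable board player (-d.1) (-d.2) hun board.length (r - d.1 - d.1)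
      (c - d.2 - d.2) (board.length + 1) (by omega) (by omega)
  -- right(prev) = 1 + right(r,c)
  have hR : pvRight board player (r - d.1) (c - d.2) d = 1 + pvRight board player r c d := by
    unfold pvRight
    have he1 : r - d.1 + d.1 = r := by ring
    have he2 : c - d.2 + d.2 = c := by ring
    rw [he1, he2, pvCount_succ board player d.1 d.2 _ _ hc board.length]
    congr 1
    have := pvMeas_le_of_in (board.length : Int) d.1 d.2 r c hu'
      ⟨hrin.1, hrin.2.1, hrin.2.2.1, hrin.2.2.2.1⟩
    exact pvCount_stable board player d.1 d.2 hu' board.length (r + d.1) (c + d.2)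
      (board.length + 1) (by omega) (by omega)
  constructor
  · unfold pvLen; omega
  · unfold pvOpen
    rw [hL, hR]
    have e1 : r - (1 + pvLeft board player (r - d.1) (c - d.2) d + 1) * d.1 =
        r - d.1 - (pvLeft board player (r - d.1) (c - d.2) d + 1) * d.1 := by ring
    have e2 : c - (1 + pvLeft board player (r - d.1) (c - d.2) d + 1) * d.2 =
        c - d.2 - (pvLeft board player (r - d.1) (c - d.2) d + 1) * d.2 := by ring
    have e3 : r + (pvRight board player r c d + 1) * d.1 =
        r - d.1 + (1 + pvRight board player r c d + 1) * d.1 := by ring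
    have e4 : c + (pvRight board player r c d + 1) * d.2 =
        c - d.2 + (1 + pvRight board player r c d + 1) * d.2 := by ring
    rw [e1, e2, e3, e4]

-- at the first cell of a run, B's step computes exactly A's step
theorem pvStepB_start (board : List (List Int)) (player r c : Int) (d : Int × Int)
    (hd : pvUnit d) (hc : pvGuard board player r c)
    (hp : ¬ pvGuard board player (r - d.1) (c - d.2)) (s : Int × Int) :
    pvStepB board player r c s d = pvStepA board player r c s d := by
  have hu' : pvUnit (d.1, d.2) := by rwa [Prod.mk.eta]
  have hrin := (pvGuard_iff board player r c).mp hc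
  have hL : pvLeft board player r c d = 0 :=
    pvCount_zero board player (-d.1) (-d.2) (r - d.1) (c - d.2) hp (board.length + 1)
  have hlen : pvCountA board player d.1 d.2 (board.length + 1) r c =
      1 + pvRight board player r c d := by
    rw [pvCount_succ board player d.1 d.2 r c hc board.length]
    congr 1
    have := pvMeas_le_of_in (board.length : Int) d.1 d.2 r c hu'
      ⟨hrin.1, hrin.2.1, hrin.2.2.1, hrin.2.2.2.1⟩
    exact pvCount_stable board player d.1 d.2 hu' board.length (r + d.1) (c + d.2)
      (board.length + 1) (by omega) (by omega)
  rw [pvStepA_eq]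
  simp only [pvStepB, if_neg hp, hlen]
  unfold pvLen pvOpen
  rw [hL]
  have e1 : r - (0 + 1) * d.1 = r - d.1 := by ring
  have e2 : c - (0 + 1) * d.2 = c - d.2 := by ring
  have e3 : r + (1 + pvRight board player r c d) * d.1 =
      r + (pvRight board player r c d + 1) * d.1 := by ring
  have e4 : c + (1 + pvRight board player r c d) * d.2 =
      c + (pvRight board player r c d + 1) * d.2 := by ring
  rw [e1, e2, e3, e4]
  have e5 : (0 : Int) + 1 + pvRight board player r c d = 1 + pvRight board player r c d := by
    ring
  rw [e5]

theorem pvUnit_of_mem (d : Int × Int) (hd : d ∈ pvDirs) : pvUnit d := by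
  fin_cases hd <;> exact ⟨by norm_num, by norm_num, by norm_num⟩

-- after the four directions at a stone, the state dominates every open candidate there
theorem pvDirs_fold_good (board : List (List Int)) (player r c : Int) :
    ∀ (l : List (Int × Int)) (s : Int × Int),
      s.1 ≤ (l.foldl (pvStepA board player r c) s).1 ∧
        ∀ d ∈ l, 0 < pvOpen board player r c d →
          pvLen board player r c d ≤ (l.foldl (pvStepA board player r c) s).1 := by
  intro l
  induction l with
  | nil => exact fun s => ⟨le_refl _, by simp⟩
  | cons d t ih =>
    intro s
    obtain ⟨ihm, ihg⟩ := ih (pvStepA board player r c s d)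
    refine ⟨le_trans (pvStepA_mono board player r c s d) ihm, ?_⟩
    intro d' hd' ho
    rcases List.mem_cons.mp hd' with rfl | hd'
    · refine le_trans ?_ ihm
      rw [pvStepA_eq]; split_ifs with h
      · exact le_refl _
      · simp only [not_and, not_lt] at h; exact h ho
    · exact ihg d' hd' ho

-- B's four-direction fold equals A's, given the state already dominates earlier stones
theorem pvDirs_fold_eq (board : List (List Int)) (player r c : Int)
    (hc : pvGuard board player r c)
    (l : List (Int × Int)) :
    (∀ d ∈ l, d ∈ pvDirs) →
    ∀ (s : Int × Int),
      (∀ r' c', pvRM (r', c') (r, c) → pvGuard board player r' c' →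
        pvGoodAt board player s r' c') →
      l.foldl (pvStepA board player r c) s = l.foldl (pvStepB board player r c) s := by
  induction l with
  | nil => intro _ s _; rfl
  | cons d t iht =>
    intro hl s HG
    have hd4 : d ∈ pvDirs := hl d List.mem_cons_self
    have hu := pvUnit_of_mem d hd4
    have hstep : pvStepA board player r c s d = pvStepB board player r c s d := by
      by_cases hp : pvGuard board player (r - d.1) (c - d.2)
      · have hB : pvStepB board player r c s d = s := by simp [pvStepB, hp]
        have hshift := pvCand_shift board player r c d hu hc hp
        have hlt : pvRM (r - d.1, c - d.2) (r, c) := by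
          fin_cases hd4 <;> simp [pvRM]
        have hg' := HG (r - d.1) (c - d.2) hlt hp d hd4
        have hA : pvStepA board player r c s d = s := by
          rw [pvStepA_eq, hshift.1, hshift.2]
          split_ifs with h
          · exact absurd (hg' h.1) (by omega)
          · rfl
        rw [hA, hB]
      · exact (pvStepB_start board player r c d hu hc hp s).symm
    simp only [List.foldl_cons]
    rw [← hstep]
    exact iht (fun d' hd' => hl d' (List.mem_cons_of_mem d hd')) _
      (fun r' c' hlt hg => pvGoodAt_mono board player s _ r' c'
        (pvStepA_mono board player r c s d) (HG r' c' hlt hg))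

theorem pvMem_cells (N : Int) (r c : Int) :
    (r, c) ∈ pvCells N ↔ 0 ≤ r ∧ r < N ∧ 0 ≤ c ∧ c < N := by
  simp only [pvCells, List.mem_flatMap, List.mem_map, PySem.List.mem_pyRange_one,
    Prod.mk.injEq]
  constructor
  · rintro ⟨r', hr', c', hc', rfl, rfl⟩; exact ⟨hr'.1, hr'.2, hc'.1, hc'.2⟩
  · rintro ⟨h1, h2, h3, h4⟩; exact ⟨r, ⟨h1, h2⟩, c, ⟨h3, h4⟩, rfl, rfl⟩

theorem pvCells_pairwise (N : Int) : (pvCells N).Pairwise pvRM := by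
  unfold pvCells
  rw [List.pairwise_flatMap]
  constructor
  · intro a _
    refine List.Pairwise.map _ ?_ (PySem.List.pairwise_lt_pyRange_one 0 N)
    intro x y hxy; exact Or.inr ⟨rfl, hxy⟩
  · refine List.Pairwise.imp ?_ (PySem.List.pairwise_lt_pyRange_one 0 N)
    intro a b hab x hx y hy
    simp only [List.mem_map] at hx hy
    obtain ⟨cx, -, rfl⟩ := hx
    obtain ⟨cy, -, rfl⟩ := hy
    exact Or.inl hab

-- a cell row-major-before a split point of pvCells lies in the prefix
theorem pvMem_pre (N : Int) (pre suf : List (Int × Int)) (r c : Int)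
    (hsplit : pvCells N = pre ++ (r, c) :: suf) (r' c' : Int)
    (hin : 0 ≤ r' ∧ r' < N ∧ 0 ≤ c' ∧ c' < N) (hlt : pvRM (r', c') (r, c)) :
    (r', c') ∈ pre := by
  have hmem : (r', c') ∈ pvCells N := (pvMem_cells N r' c').mpr hin
  rw [hsplit] at hmem
  rcases List.mem_append.mp hmem with h | h
  · exact h
  · have hpw := pvCells_pairwise N
    rw [hsplit] at hpw
    have h2 := (List.pairwise_append.mp hpw).2.1
    rcases List.mem_cons.mp h with heq | h
    · rw [heq] at hlt; rcases hlt with h | h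
      · omega
      · omega
    · have := (List.pairwise_cons.mp h2).1 _ h
      rcases this with h' | h' <;> rcases hlt with h'' | h'' <;>
        simp_all [pvRM] <;> omega

theorem pvCellStepA_mono (board : List (List Int)) (player : Int) (s : Int × Int)
    (rc : Int × Int) : s.1 ≤ (pvCellStepA board player s rc).1 := by
  unfold pvCellStepA
  split_ifs with h
  · exact le_refl _
  · exact (pvDirs_fold_good board player rc.1 rc.2 pvDirs s).1

-- the main induction along the row-major cell list
theorem pvMain (board : List (List Int)) (player : Int) :
    ∀ (suf pre : List (Int × Int)) (s : Int × Int),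
      pvCells (board.length : Int) = pre ++ suf →
      (∀ p ∈ pre, pvGuard board player p.1 p.2 → pvGoodAt board player s p.1 p.2) →
      suf.foldl (pvCellStepA board player) s = suf.foldl (pvCellStepB board player) s := by
  intro suf
  induction suf with
  | nil => intro pre s _ _; rfl
  | cons rc suf ih =>
    intro pre s hsplit HG
    obtain ⟨r, c⟩ := rc
    have hin : (r, c) ∈ pvCells (board.length : Int) := by
      rw [hsplit]; exact List.mem_append_right _ List.mem_cons_self
    have hinR := (pvMem_cells (board.length : Int) r c).mp hin
    have hstep : pvCellStepA board player s (r, c) = pvCellStepB board player s (r, c) := by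
      unfold pvCellStepA pvCellStepB
      split_ifs with h
      · rfl
      · rw [not_not] at h
        have hc : pvGuard board player r c := by
          rw [pvGuard_iff]; exact ⟨hinR.1, hinR.2.1, hinR.2.2.1, hinR.2.2.2, h⟩
        refine pvDirs_fold_eq board player r c hc pvDirs (fun d hd => hd) s ?_
        intro r' c' hlt hg'
        have hin' := (pvGuard_iff board player r' c').mp hg'
        have hpre := pvMem_pre (board.length : Int) pre suf r c hsplit r' c'
          ⟨hin'.1, hin'.2.1, hin'.2.2.1, hin'.2.2.2.1⟩ hlt
        exact HG (r', c') hpre hg'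
    have hHG' : ∀ p ∈ pre ++ [(r, c)], pvGuard board player p.1 p.2 →
        pvGoodAt board player (pvCellStepA board player s (r, c)) p.1 p.2 := by
      intro p hp hg
      rcases List.mem_append.mp hp with hp | hp
      · exact pvGoodAt_mono board player s _ p.1 p.2
          (pvCellStepA_mono board player s (r, c)) (HG p hp hg)
      · rcases List.mem_singleton.mp hp with rfl
        have hcell : ¬ pvCell board r c ≠ player := by
          have := (pvGuard_iff board player r c).mp hg
          simp [this.2.2.2.2]
        unfold pvCellStepA
        rw [if_neg hcell]
        intro d hd ho
        exact (pvDirs_fold_good board player r c pvDirs s).2 d hd ho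
    simp only [List.foldl_cons]
    rw [← hstep]
    exact ih (pre ++ [(r, c)]) (pvCellStepA board player s (r, c))
      (by rw [hsplit]; simp) hHG'

-- the double loops are the fold over the flattened cell list
theorem pvFlattenA (board : List (List Int)) (player : Int) :
    longest_chain_open board player =
      (pvCells (board.length : Int)).foldl (pvCellStepA board player) (0, 0) := by
  simp only [longest_chain_open, pvCells]
  rw [List.foldl_flatMap]
  apply PySem.List.foldl_congr_mem
  intro s r _
  exact (List.foldl_map).symm

-- ===== table correctness: the DP dict holds the forward counts =====

-- full-fuel forward count (what the table must contain at in-grid player cells)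
def pvFull (board : List (List Int)) (player dr dc r c : Int) : Int :=
  pvCountA board player dr dc (board.length + 1) r c

theorem pvCount_nonneg (board : List (List Int)) (player dr dc : Int) :
    ∀ (f : Nat) (r c : Int), 0 ≤ pvCountA board player dr dc f r c := by
  intro f
  induction f with
  | zero => intro r c; simp [pvCountA]
  | succ f ih =>
    intro r c
    simp only [pvCountA]
    split_ifs with h
    · have := ih (r + dr) (c + dc); omega
    · exact le_refl 0

-- the table's fold over the reversed ranges, flattened to the reversed cell list
theorem pvTabFlatten (board : List (List Int)) (player dr dc : Int) :
    pvTab board player dr dc (board.length : Int) =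
      ((pvCells (board.length : Int)).reverse).foldl
        (fun cnt rc =>
          if pvCell board rc.1 rc.2 == player then
            cnt.insert (rc.1, rc.2) (1 + cnt.getD (rc.1 + dr, rc.2 + dc) 0)
          else cnt)
        PySem.Dict.empty := by
  have e : PySem.List.pyRange ((board.length : Int) - 1) (-1) (-1) =
      (PySem.List.pyRange 0 (board.length : Int) 1).reverse := by
    rw [PySem.List.pyRange_neg_one_eq_reverse]; norm_num
  simp only [pvTab, pvCells, e]
  rw [List.reverse_flatMap, List.foldl_flatMap]
  apply PySem.List.foldl_congr_mem
  intro cnt r _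
  simp only [Function.comp]
  rw [← List.map_reverse, List.foldl_map]

-- one direction's successor cell is strictly row-major after its cell, for each DIRS entry
theorem pvRM_succ (d : Int × Int) (hd : d ∈ pvDirs) (r c : Int) :
    pvRM (r, c) (r + d.1, c + d.2) := by
  fin_cases hd <;> simp [pvRM]

-- invariant induction along the reversed row-major cell list
theorem pvTabInv (board : List (List Int)) (player : Int) (d : Int × Int)
    (hd : d ∈ pvDirs) :
    ∀ (suf pre : List (Int × Int)) (cnt : PySem.Dict (Int × Int) Int),
      (pvCells (board.length : Int)).reverse = pre ++ suf →
      (∀ r c, cnt.getD (r, c) 0 =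
        if (r, c) ∈ pre then pvFull board player d.1 d.2 r c else 0) →
      ∀ r c,
        (suf.foldl
          (fun cnt rc =>
            if pvCell board rc.1 rc.2 == player then
              cnt.insert (rc.1, rc.2) (1 + cnt.getD (rc.1 + d.1, rc.2 + d.2) 0)
            else cnt)
          cnt).getD (r, c) 0 =
          if (r, c) ∈ pre ++ suf then pvFull board player d.1 d.2 r c else 0 := by
  intro suf
  induction suf with
  | nil => intro pre cnt hsplit hinv r c; simpa using hinv r c
  | cons rc suf ih =>
    intro pre cnt hsplit hinv r c
    obtain ⟨r0, c0⟩ := rc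
    have hu := pvUnit_of_mem d hd
    have hmem : (r0, c0) ∈ pvCells (board.length : Int) := by
      rw [← List.mem_reverse, hsplit]
      exact List.mem_append_right _ List.mem_cons_self
    have hin0 := (pvMem_cells (board.length : Int) r0 c0).mp hmem
    -- (r0, c0) itself is not in pre (the reversed cell list has no duplicates)
    have hnotpre : (r0, c0) ∉ pre := by
      have hpw : ((pvCells (board.length : Int)).reverse).Pairwise
          (fun a b => pvRM b a) := by
        rw [List.pairwise_reverse]; exact pvCells_pairwise (board.length : Int)
      rw [hsplit] at hpw
      intro hmem'
      have := (List.pairwise_append.mp hpw).2.2 _ hmem' _ List.mem_cons_self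
      rcases this with h | h <;> omega
    have hu' : pvUnit (d.1, d.2) := by rwa [Prod.mk.eta]
    by_cases hcell : pvCell board r0 c0 == player
    · -- a player cell: one insert, holding the full count
      have hg : pvGuard board player r0 c0 := by
        rw [pvGuard_iff]
        exact ⟨hin0.1, hin0.2.1, hin0.2.2.1, hin0.2.2.2, by simpa using hcell⟩
      -- the inserted value is the full count at (r0, c0)
      have hval : 1 + cnt.getD (r0 + d.1, c0 + d.2) 0 =
          pvFull board player d.1 d.2 r0 c0 := by
        by_cases hnin : 0 ≤ r0 + d.1 ∧ r0 + d.1 < (board.length : Int) ∧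
            0 ≤ c0 + d.2 ∧ c0 + d.2 < (board.length : Int)
        · -- successor in the grid: it was processed earlier, so the dict already has it
          have hprev : (r0 + d.1, c0 + d.2) ∈ pre := by
            have hmem2 : (r0 + d.1, c0 + d.2) ∈ pvCells (board.length : Int) :=
              (pvMem_cells _ _ _).mpr hnin
            rw [← List.mem_reverse, hsplit] at hmem2
            rcases List.mem_append.mp hmem2 with h | h
            · exact h
            · exfalso
              have hpw : ((pvCells (board.length : Int)).reverse).Pairwise
                  (fun a b => pvRM b a) := by
                rw [List.pairwise_reverse]; exact pvCells_pairwise (board.length : Int)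
              rw [hsplit] at hpw
              have h2 := (List.pairwise_append.mp hpw).2.1
              have hrm := pvRM_succ d hd r0 c0
              rcases List.mem_cons.mp h with heq | h
              · rw [heq] at hrm
                simp only [pvRM] at hrm
                omega
              · have := (List.pairwise_cons.mp h2).1 _ h
                rcases this with h' | h' <;> rcases hrm with h'' | h'' <;>
                  simp_all [pvRM] <;> omega
          rw [hinv (r0 + d.1) (c0 + d.2), if_pos hprev]
          unfold pvFull
          rw [pvCount_succ board player d.1 d.2 r0 c0 hg board.length]
          congr 1
          have := pvMeas_le_of_in (board.length : Int) d.1 d.2 r0 c0 hu'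
            ⟨hin0.1, hin0.2.1, hin0.2.2.1, hin0.2.2.2⟩
          exact (pvCount_stable board player d.1 d.2 hu'
            board.length (r0 + d.1) (c0 + d.2) (board.length + 1) (by omega)
            (by omega)).symm
        · -- successor off the grid: its count is 0 and the dict has no entry for it
          have hnp : (r0 + d.1, c0 + d.2) ∉ pre := by
            intro hmem2
            have : (r0 + d.1, c0 + d.2) ∈ pvCells (board.length : Int) := by
              rw [← List.mem_reverse, hsplit]; exact List.mem_append_left _ hmem2
            exact hnin ((pvMem_cells _ _ _).mp this)
          rw [hinv (r0 + d.1) (c0 + d.2), if_neg hnp]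
          unfold pvFull
          rw [pvCount_succ board player d.1 d.2 r0 c0 hg board.length]
          have hgf : ¬ pvGuard board player (r0 + d.1) (c0 + d.2) := by
            rw [pvGuard_iff]; tauto
          rw [pvCount_zero board player d.1 d.2 _ _ hgf board.length]
      have hlists : (pre ++ [(r0, c0)]) ++ suf = pre ++ (r0, c0) :: suf := by simp
      simp only [List.foldl_cons, if_pos hcell]
      rw [ih (pre ++ [(r0, c0)]) _ (by rw [hsplit]; simp) ?_ r c, hlists]
      intro r' c'
      rw [PySem.Dict.getD_insert]
      by_cases heq : (r', c') = (r0, c0)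
      · injection heq with h1 h2
        subst h1; subst h2
        rw [if_pos rfl, if_pos (by simp), hval]
      · rw [if_neg heq, hinv r' c']
        by_cases hp : (r', c') ∈ pre
        · rw [if_pos hp, if_pos (by simp [hp])]
        · rw [if_neg hp, if_neg (by simp [hp, heq])]
    · -- not a player cell: no insert; its full count is 0 anyway
      have hg : ¬ pvGuard board player r0 c0 := by
        rw [pvGuard_iff]
        intro h
        exact hcell (by simp [h.2.2.2.2])
      have hlists : (pre ++ [(r0, c0)]) ++ suf = pre ++ (r0, c0) :: suf := by simp
      simp only [List.foldl_cons, if_neg hcell]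
      rw [ih (pre ++ [(r0, c0)]) _ (by rw [hsplit]; simp) ?_ r c, hlists]
      intro r' c'
      rw [hinv r' c']
      by_cases heq : (r', c') = (r0, c0)
      · injection heq with h1 h2
        subst h1; subst h2
        rw [if_neg hnotpre, if_pos (by simp)]
        unfold pvFull
        rw [pvCount_zero board player d.1 d.2 _ _ hg (board.length + 1)]
      · by_cases hp : (r', c') ∈ pre
        · rw [if_pos hp, if_pos (by simp [hp])]
        · rw [if_neg hp, if_neg (by simp [hp, heq])]

-- the table lookup IS the full-fuel forward count, at every in-grid cell
theorem pvTab_getD (board : List (List Int)) (player : Int) (d : Int × Int)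
    (hd : d ∈ pvDirs) (r c : Int)
    (hin : 0 ≤ r ∧ r < (board.length : Int) ∧ 0 ≤ c ∧ c < (board.length : Int)) :
    (pvTab board player d.1 d.2 (board.length : Int)).getD (r, c) 0 =
      pvFull board player d.1 d.2 r c := by
  rw [pvTabFlatten]
  have := pvTabInv board player d hd ((pvCells (board.length : Int)).reverse) []
    PySem.Dict.empty (by simp) (by intro r' c'; simp [PySem.Dict.getD_empty]) r c
  rw [this]
  rw [if_pos (by rw [List.nil_append, List.mem_reverse]; exact (pvMem_cells _ _ _).mpr hin)]

-- B's scoring step at an in-grid cell equals the proof-side pvStepB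
theorem pvScore_eq (board : List (List Int)) (player r c : Int) (d : Int × Int)
    (hd : d ∈ pvDirs)
    (hin : 0 ≤ r ∧ r < (board.length : Int) ∧ 0 ≤ c ∧ c < (board.length : Int))
    (hcell : pvCell board r c = player) (s : Int × Int) :
    pvScore board player r c s (d, pvTab board player d.1 d.2 (board.length : Int)) =
      pvStepB board player r c s d := by
  have hg : pvGuard board player r c := by
    rw [pvGuard_iff]; exact ⟨hin.1, hin.2.1, hin.2.2.1, hin.2.2.2, hcell⟩
  have hlen : (pvTab board player d.1 d.2 (board.length : Int)).getD (r, c) 0 =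
      pvCountA board player d.1 d.2 (board.length + 1) r c :=
    pvTab_getD board player d hd r c hin
  have hpos : ¬ (pvCountA board player d.1 d.2 (board.length + 1) r c == 0) = true := by
    rw [pvCount_succ board player d.1 d.2 r c hg board.length]
    have := pvCount_nonneg board player d.1 d.2 board.length (r + d.1) (c + d.2)
    simp only [beq_iff_eq]; omega
  simp only [pvScore, pvStepB, hlen, if_neg hpos]
  rfl

-- at an in-grid non-player cell every table lookup is 0, so the scoring fold is the identity
theorem pvScore_skip (board : List (List Int)) (player r c : Int) (d : Int × Int)
    (hd : d ∈ pvDirs)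
    (hin : 0 ≤ r ∧ r < (board.length : Int) ∧ 0 ≤ c ∧ c < (board.length : Int))
    (hcell : pvCell board r c ≠ player) (s : Int × Int) :
    pvScore board player r c s (d, pvTab board player d.1 d.2 (board.length : Int)) = s := by
  have hg : ¬ pvGuard board player r c := by
    rw [pvGuard_iff]; intro h; exact hcell h.2.2.2.2
  have hlen : (pvTab board player d.1 d.2 (board.length : Int)).getD (r, c) 0 = 0 := by
    rw [pvTab_getD board player d hd r c hin]
    exact pvCount_zero board player d.1 d.2 r c hg (board.length + 1)
  simp [pvScore, hlen]

-- B's per-cell fold over the four (direction, table) pairs equals pvCellStepB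
theorem pvScore_cell (board : List (List Int)) (player : Int) (rc : Int × Int)
    (hin : 0 ≤ rc.1 ∧ rc.1 < (board.length : Int) ∧ 0 ≤ rc.2 ∧
      rc.2 < (board.length : Int)) (s : Int × Int) :
    (pvDirs.map (fun d => (d, pvTab board player d.1 d.2 (board.length : Int)))).foldl
        (pvScore board player rc.1 rc.2) s = pvCellStepB board player s rc := by
  rw [List.foldl_map]
  unfold pvCellStepB
  by_cases hcell : pvCell board rc.1 rc.2 ≠ player
  · rw [if_pos hcell]
    have : ∀ l : List (Int × Int), (∀ d ∈ l, d ∈ pvDirs) →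
        l.foldl (fun s d =>
          pvScore board player rc.1 rc.2 s
            (d, pvTab board player d.1 d.2 (board.length : Int))) s = s := by
      intro l
      induction l with
      | nil => intro _; rfl
      | cons d t ih =>
        intro hl
        simp only [List.foldl_cons]
        rw [pvScore_skip board player rc.1 rc.2 d (hl d List.mem_cons_self) hin hcell s]
        exact ih (fun d' hd' => hl d' (List.mem_cons_of_mem d hd'))
    exact this pvDirs (fun d hd => hd)
  · rw [not_not] at hcell
    rw [if_neg (not_not_intro hcell)]
    apply PySem.List.foldl_congr_mem
    intro t d hd
    exact pvScore_eq board player rc.1 rc.2 d hd hin hcell t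

-- B's whole program is the fold of pvCellStepB over the flattened cell list
theorem pvFlattenB (board : List (List Int)) (player : Int) :
    longest_chain_open_alt board player =
      (pvCells (board.length : Int)).foldl (pvCellStepB board player) (0, 0) := by
  simp only [longest_chain_open_alt, pvCells]
  rw [List.foldl_flatMap]
  have hdirs : ([(0, 1), (1, 0), (1, 1), (1, -1)] : List (Int × Int)) = pvDirs := rfl
  apply PySem.List.foldl_congr_mem
  intro s r hr
  rw [List.foldl_map]
  apply PySem.List.foldl_congr_mem
  intro t c hc
  rw [hdirs]
  exact pvScore_cell board player (r, c)
    ⟨(PySem.List.mem_pyRange_one.mp hr).1, (PySem.List.mem_pyRange_one.mp hr).2,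
      (PySem.List.mem_pyRange_one.mp hc).1, (PySem.List.mem_pyRange_one.mp hc).2⟩ t

-- ===== VERDICT (by name: the statement is the Claim_ definition above) =====
theorem longest_chain_open_spec : Claim_equal_longest_chain_open := by
  intro board player _ _
  unfold Spec_longest_chain_open
  rw [pvFlattenA, pvFlattenB]
  exact pvMain board player (pvCells (board.length : Int)) [] (0, 0) rfl (by simp)
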